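-- pv_equiv track=rewrite | github.com/florianwolz/prime | prime/output/output_coefficient.py | epsilonGammaToTeX
-- ===== SOURCE A (Python) =====
-- greekAlphabet = ["\\alpha", "\\beta", "\\gamma", "\\delta", "\\epsilon",
--                  "\\zeta", "\\eta", "\\theta", "\\iota", "\\kappa",
--                  "\\lambda", "\\mu", "\\nu", "\\xi", "\\pi", "\\rho",
--                  "\\sigma", "\\tau", "\\varphi", "\\chi", "\\psi", "\\omega"]
--
-- def epsilonGammaToTeX(indices, offset=0):
--     if len(indices) == 0 or len(indices) == 1: return "0"
--     elif len(indices) % 2 == 0: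
--         result = ""
--         for i in range(0,len(indices),2):
--             result += "\gamma^{" + \
--                 greekAlphabet[indices[i] + offset] + \
--                 greekAlphabet[indices[i+1] + offset] + \
--                 "}"
--         return result
--     else:
--         result = "\\varepsilon^{" + \
--                 greekAlphabet[indices[0] + offset] + \
--                 greekAlphabet[indices[1] + offset] + \
--                 greekAlphabet[indices[2] + offset] + \
--                 "}"
--         if len(indices) == 3: return result
--         return result + epsilonGammaToTeX(indices[3:], offset)
-- ===== SOURCE B (Python) =====
-- greekAlphabet = ["\\alpha", "\\beta", "\\gamma", "\\delta", "\\epsilon",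
--                  "\\zeta", "\\eta", "\\theta", "\\iota", "\\kappa",
--                  "\\lambda", "\\mu", "\\nu", "\\xi", "\\pi", "\\rho",
--                  "\\sigma", "\\tau", "\\varphi", "\\chi", "\\psi", "\\omega"]
--
-- def epsilonGammaToTeX(indices, offset=0):
--     # Single iterative pass: optional epsilon head for odd length, then
--     # consume the remaining (always even) tail two elements at a time.
--     n = len(indices)
--     if n < 2:
--         return "0"
--     if n % 2 == 1:
--         out = ("\\varepsilon^{"
--                + greekAlphabet[indices[0] + offset]
--                + greekAlphabet[indices[1] + offset]
--                + greekAlphabet[indices[2] + offset]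
--                + "}")
--         rest = indices[3:]
--     else:
--         out = ""
--         rest = indices
--     while rest:
--         out += ("\gamma^{"
--                 + greekAlphabet[rest[0] + offset]
--                 + greekAlphabet[rest[1] + offset]
--                 + "}")
--         rest = rest[2:]
--     return out
-- ===== Notes on version B (the rewrite author's own statement) =====
-- stated objective: alternative
-- what changed: A's odd-case self-recursion plus an index-based range(0,len,2) loop is replaced by a single non-recursive pass: an optional epsilon head computed once, then one destructuring while-loop that consumes the remaining (always even-length) tail two elements at a time without index arithmetic.
import Mathlib
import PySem

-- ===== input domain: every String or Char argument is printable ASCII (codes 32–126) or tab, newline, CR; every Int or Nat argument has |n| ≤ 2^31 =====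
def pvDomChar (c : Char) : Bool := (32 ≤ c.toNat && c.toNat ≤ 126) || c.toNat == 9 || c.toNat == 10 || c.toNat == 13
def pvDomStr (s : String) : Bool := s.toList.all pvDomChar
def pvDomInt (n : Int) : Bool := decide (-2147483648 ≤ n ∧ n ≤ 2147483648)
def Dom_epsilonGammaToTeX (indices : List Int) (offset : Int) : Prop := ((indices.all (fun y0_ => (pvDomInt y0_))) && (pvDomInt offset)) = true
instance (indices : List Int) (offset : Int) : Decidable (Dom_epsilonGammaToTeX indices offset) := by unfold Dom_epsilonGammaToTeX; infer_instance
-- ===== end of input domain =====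

-- B replaces A's odd-case recursion and index-based pair loop by one iterative pass:
-- an optional epsilon head, then a destructuring loop over the remaining pairs (objective: alternative decomposition).

-- module constant shared by both Python files
def greekAlphabet : List String :=
  ["\\alpha", "\\beta", "\\gamma", "\\delta", "\\epsilon",
   "\\zeta", "\\eta", "\\theta", "\\iota", "\\kappa",
   "\\lambda", "\\mu", "\\nu", "\\xi", "\\pi", "\\rho",
   "\\sigma", "\\tau", "\\varphi", "\\chi", "\\psi", "\\omega"]

-- greekAlphabet[k] (Python indexing; the "" default is never reached under Pre_)
def pyGreek (k : Int) : String := (PySem.List.pyGet? greekAlphabet k).getD ""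

-- ===== PORT A =====
def epsilonGammaToTeX (indices : List Int) (offset : Int) : String :=
  if _h0 : indices.length = 0 ∨ indices.length = 1 then "0"
  else if indices.length % 2 = 0 then
    (PySem.List.pyRange 0 (indices.length : Int) 2).foldl
      (fun result i =>
        result ++ "\\gamma^{"
          ++ pyGreek ((PySem.List.pyGet? indices i).getD 0 + offset)
          ++ pyGreek ((PySem.List.pyGet? indices (i + 1)).getD 0 + offset)
          ++ "}") ""
  else
    -- Python's local 'result' (the epsilon head) is inlined into the two return sites
    if indices.length = 3 then
      "\\varepsilon^{"
        ++ pyGreek ((PySem.List.pyGet? indices 0).getD 0 + offset)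
        ++ pyGreek ((PySem.List.pyGet? indices 1).getD 0 + offset)
        ++ pyGreek ((PySem.List.pyGet? indices 2).getD 0 + offset)
        ++ "}"
    else
      "\\varepsilon^{"
        ++ pyGreek ((PySem.List.pyGet? indices 0).getD 0 + offset)
        ++ pyGreek ((PySem.List.pyGet? indices 1).getD 0 + offset)
        ++ pyGreek ((PySem.List.pyGet? indices 2).getD 0 + offset)
        ++ "}" ++ epsilonGammaToTeX (PySem.List.slice indices (some 3) none) offset
termination_by indices.length
decreasing_by
  rw [PySem.List.slice_from indices (a := 3) (by norm_num)]
  simp only [List.length_drop]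
  omega

-- ===== PORT B =====
-- the 'while rest:' loop of Source B (rest always has even length at every entry)
def gammaLoop (offset : Int) (out : String) : List Int → String
  | a :: b :: t =>
      gammaLoop offset
        (out ++ "\\gamma^{" ++ pyGreek (a + offset) ++ pyGreek (b + offset) ++ "}") t
  | _ => out

def epsilonGammaToTeX_alt (indices : List Int) (offset : Int) : String :=
  if indices.length < 2 then "0"
  else if indices.length % 2 = 1 then
    gammaLoop offset
      ("\\varepsilon^{"
        ++ pyGreek ((PySem.List.pyGet? indices 0).getD 0 + offset)
        ++ pyGreek ((PySem.List.pyGet? indices 1).getD 0 + offset)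
        ++ pyGreek ((PySem.List.pyGet? indices 2).getD 0 + offset)
        ++ "}")
      (PySem.List.slice indices (some 3) none)
  else
    gammaLoop offset "" indices

-- ===== PRECONDITION & SPEC =====
-- Pre_ excludes exactly the inputs on which the Python raises IndexError: a list of
-- length ≥ 2 containing an element whose shifted value falls outside Python's valid
-- index range [-22, 22) for the 22-entry greekAlphabet.
def Pre_epsilonGammaToTeX (indices : List Int) (offset : Int) : Prop :=
  indices.length ≤ 1 ∨ ∀ x ∈ indices, -22 ≤ x + offset ∧ x + offset < 22
instance (indices : List Int) (offset : Int) : Decidable (Pre_epsilonGammaToTeX indices offset) := by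
  unfold Pre_epsilonGammaToTeX; infer_instance

def pvWitness_epsilonGammaToTeX : List Int × Int := ([0, 1, 2, 3, 4], 1)

def Spec_epsilonGammaToTeX (indices : List Int) (offset : Int) (out : String) : Prop := out = epsilonGammaToTeX_alt indices offset
instance (indices : List Int) (offset : Int) (out : String) : Decidable (Spec_epsilonGammaToTeX indices offset out) := by unfold Spec_epsilonGammaToTeX; infer_instance

-- ===== CLAIM (what is proved, stated in full; the proofs are below) =====
def Claim_equal_epsilonGammaToTeX : Prop := ∀ (indices : List Int) (offset : Int), Dom_epsilonGammaToTeX indices offset → Pre_epsilonGammaToTeX indices offset → Spec_epsilonGammaToTeX indices offset (epsilonGammaToTeX indices offset)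

-- ===== LEMMAS AND PROOFS =====

-- range(0, n, 2) as a mapped List.range
theorem pyRange_two (n : Nat) :
    PySem.List.pyRange 0 (n : Int) 2 =
      (List.range ((n + 1) / 2)).map (fun k : Nat => 2 * (k : Int)) := by
  rw [PySem.List.pyRange_of_pos 0 (n : Int) (s := 2) (by norm_num)]
  rcases Nat.eq_zero_or_pos n with h | h
  · subst h; simp
  · rw [if_pos (by exact_mod_cast h)]
    have hq : (((n : Int) - 0 + 2 - 1) / 2).toNat = (n + 1) / 2 := by omega
    rw [hq]
    simp

-- shifting range(0, n+2, 2) off its head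
theorem pyRange_two_shift (n : Nat) :
    PySem.List.pyRange 0 ((n : Int) + 2) 2 =
      0 :: (PySem.List.pyRange 0 (n : Int) 2).map (fun i : Int => i + 2) := by
  have h2 : ((n : Int) + 2) = ((n + 2 : Nat) : Int) := by push_cast; ring
  rw [h2, pyRange_two, pyRange_two]
  have hm : (n + 2 + 1) / 2 = (n + 1) / 2 + 1 := by omega
  rw [hm, List.range_succ_eq_map]
  simp only [List.map_cons, List.map_map, Nat.cast_zero, mul_zero]
  refine congrArg₂ List.cons (by norm_num) ?_
  apply List.map_congr_left
  intro k _
  simp only [Function.comp_apply]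
  push_cast; ring

-- the accumulator of B's while loop factors out
theorem gammaLoop_acc (offset : Int) :
    ∀ (xs : List Int) (s : String),
      gammaLoop offset s xs = s ++ gammaLoop offset "" xs
  | [], s => by simp [gammaLoop]
  | [a], s => by simp [gammaLoop]
  | a :: b :: t, s => by
      conv_lhs => rw [gammaLoop, gammaLoop_acc offset t]
      conv_rhs => rw [gammaLoop, gammaLoop_acc offset t]
      simp [String.append_assoc]

-- A's even-length for loop computes B's while loop
theorem even_loop (offset : Int) :
    ∀ (xs : List Int), xs.length % 2 = 0 → ∀ s : String,
      (PySem.List.pyRange 0 (xs.length : Int) 2).foldl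
        (fun result i =>
          result ++ "\\gamma^{"
            ++ pyGreek ((PySem.List.pyGet? xs i).getD 0 + offset)
            ++ pyGreek ((PySem.List.pyGet? xs (i + 1)).getD 0 + offset)
            ++ "}") s
      = gammaLoop offset s xs
  | [], _, s => by
      have h0 : PySem.List.pyRange 0 ((([] : List Int).length : Nat) : Int) 2 = [] := by decide
      rw [h0]
      simp [gammaLoop]
  | [a], h, s => by simp at h
  | a :: b :: t, h, s => by
      have hlen : ((a :: b :: t).length : Int) = (t.length : Int) + 2 := by
        simp; ring
      rw [hlen, pyRange_two_shift, List.foldl_cons, List.foldl_map]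
      have hstep :
          (PySem.List.pyRange 0 (t.length : Int) 2).foldl
            (fun result i =>
              result ++ "\\gamma^{"
                ++ pyGreek ((PySem.List.pyGet? (a :: b :: t) (i + 2)).getD 0 + offset)
                ++ pyGreek ((PySem.List.pyGet? (a :: b :: t) (i + 2 + 1)).getD 0 + offset)
                ++ "}")
            (s ++ "\\gamma^{"
              ++ pyGreek ((PySem.List.pyGet? (a :: b :: t) 0).getD 0 + offset)
              ++ pyGreek ((PySem.List.pyGet? (a :: b :: t) (0 + 1)).getD 0 + offset)
              ++ "}")
          = (PySem.List.pyRange 0 (t.length : Int) 2).foldl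
            (fun result i =>
              result ++ "\\gamma^{"
                ++ pyGreek ((PySem.List.pyGet? t i).getD 0 + offset)
                ++ pyGreek ((PySem.List.pyGet? t (i + 1)).getD 0 + offset)
                ++ "}")
            (s ++ "\\gamma^{" ++ pyGreek (a + offset) ++ pyGreek (b + offset) ++ "}") := by
        have hbase : (PySem.List.pyGet? (a :: b :: t) (0 : Int)).getD 0 = a := by
          simp
        have hbase1 : (PySem.List.pyGet? (a :: b :: t) ((0 : Int) + 1)).getD 0 = b := by
          have : ((0 : Int) + 1) = ((0 : Nat) : Int) + 1 := by norm_num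
          rw [this, PySem.List.pyGet?_cons_succ]
          simp
        rw [hbase, hbase1]
        apply PySem.List.foldl_congr_mem
        intro acc i hi
        have hi0 : 0 ≤ i := ((PySem.List.mem_pyRange_iff_of_pos (by norm_num) i).mp hi).1
        obtain ⟨m, rfl⟩ := Int.eq_ofNat_of_zero_le hi0
        have e1 : PySem.List.pyGet? (a :: b :: t) ((m : Int) + 2) = PySem.List.pyGet? t (m : Int) := by
          have h1 : ((m : Int) + 2) = (((m + 1 : Nat)) : Int) + 1 := by push_cast; ring
          rw [h1, PySem.List.pyGet?_cons_succ]
          have h2 : (((m + 1 : Nat)) : Int) = ((m : Nat) : Int) + 1 := by push_cast; ring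
          rw [h2, PySem.List.pyGet?_cons_succ]
        have e2 : PySem.List.pyGet? (a :: b :: t) ((m : Int) + 2 + 1) = PySem.List.pyGet? t ((m : Int) + 1) := by
          have h1 : ((m : Int) + 2 + 1) = (((m + 2 : Nat)) : Int) + 1 := by push_cast; ring
          rw [h1, PySem.List.pyGet?_cons_succ]
          have h2 : (((m + 2 : Nat)) : Int) = (((m + 1 : Nat)) : Int) + 1 := by push_cast; ring
          rw [h2, PySem.List.pyGet?_cons_succ]
          norm_num
        rw [e1, e2]
      rw [hstep, even_loop offset t (by simp only [List.length_cons] at h; omega)]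
      rw [gammaLoop]

-- ===== VERDICT (by name: the statement is the Claim_ definition above) =====
theorem epsilonGammaToTeX_spec : Claim_equal_epsilonGammaToTeX := by
  intro indices offset _hdom _hpre
  unfold Spec_epsilonGammaToTeX epsilonGammaToTeX_alt
  rw [epsilonGammaToTeX]
  by_cases h0 : indices.length = 0 ∨ indices.length = 1
  · rw [dif_pos h0, if_pos (show indices.length < 2 by omega)]
  · rw [dif_neg h0, if_neg (show ¬ indices.length < 2 by omega)]
    by_cases hev : indices.length % 2 = 0
    · rw [if_pos hev, if_neg (show ¬ indices.length % 2 = 1 by omega)]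
      exact even_loop offset indices hev ""
    · rw [if_neg hev, if_pos (show indices.length % 2 = 1 by omega)]
      rw [PySem.List.slice_from indices (a := 3) (by norm_num)]
      by_cases h3 : indices.length = 3
      · rw [if_pos h3]
        have hnil : indices.drop (3 : Int).toNat = [] := by
          apply List.drop_eq_nil_of_le; omega
        rw [hnil]
        rfl
      · rw [if_neg h3]
        rw [epsilonGammaToTeX]
        have hd0 : ¬((indices.drop (3 : Int).toNat).length = 0 ∨ (indices.drop (3 : Int).toNat).length = 1) := by
          simp only [List.length_drop]; omega
        rw [dif_neg hd0]
        have hde : (indices.drop (3 : Int).toNat).length % 2 = 0 := by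
          simp only [List.length_drop]; omega
        rw [if_pos hde, even_loop offset _ hde ""]
        exact (gammaLoop_acc offset (List.drop (Int.toNat 3) indices) _).symm
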